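-- pv_equiv track=rewrite | github.com/shantgup/enhanced-cfn-mcp-server | awslabs/cfn_mcp_server/template_analyzer_clean.py | _get_security_recommendations
-- ===== SOURCE A (Python) =====
-- from typing import Dict, List, Any, Optional, Tuple
--
-- def _get_security_recommendations(issues: List[Dict[str, Any]]) -> List[str]:
--     """Get security recommendations based on identified issues."""
--     recommendations = []
--
--     issue_types = [issue['type'] for issue in issues]
--
--     if 'hardcoded_secrets' in issue_types:
--         recommendations.append("Use AWS Secrets Manager or Systems Manager Parameter Store for sensitive data")
--
--     if 'overly_permissive' in issue_types:
--         recommendations.append("Apply principle of least privilege to IAM policies and security groups")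
--
--     if 'unencrypted_storage' in issue_types:
--         recommendations.append("Enable encryption at rest for all storage services")
--
--     return recommendations
-- ===== SOURCE B (Python) =====
-- from typing import Dict, List, Any
--
-- _S1 = "Use AWS Secrets Manager or Systems Manager Parameter Store for sensitive data"
-- _S2 = "Apply principle of least privilege to IAM policies and security groups"
-- _S3 = "Enable encryption at rest for all storage services"
--
-- def _get_security_recommendations(issues: List[Dict[str, Any]]) -> List[str]:
--     # Single pass over the issues with three accumulator flags and early exit;
--     # no intermediate list of types and no repeated membership scans.
--     hs = op = ue = False
--     for issue in issues:
--         t = issue['type']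
--         hs = hs or t == 'hardcoded_secrets'
--         op = op or t == 'overly_permissive'
--         ue = ue or t == 'unencrypted_storage'
--         if hs and op and ue:
--             break
--     return (([_S1] if hs else []) + ([_S2] if op else []) + ([_S3] if ue else []))
-- ===== Notes on version B (the rewrite author's own statement) =====
-- stated objective: alternative
-- what changed: A materialises the full list of issue types and then performs three separate membership scans over it; B makes a single pass over the issues maintaining three boolean flags with early exit once all three are set, never building the type list, and assembles the result from the flags.
import Mathlib
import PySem

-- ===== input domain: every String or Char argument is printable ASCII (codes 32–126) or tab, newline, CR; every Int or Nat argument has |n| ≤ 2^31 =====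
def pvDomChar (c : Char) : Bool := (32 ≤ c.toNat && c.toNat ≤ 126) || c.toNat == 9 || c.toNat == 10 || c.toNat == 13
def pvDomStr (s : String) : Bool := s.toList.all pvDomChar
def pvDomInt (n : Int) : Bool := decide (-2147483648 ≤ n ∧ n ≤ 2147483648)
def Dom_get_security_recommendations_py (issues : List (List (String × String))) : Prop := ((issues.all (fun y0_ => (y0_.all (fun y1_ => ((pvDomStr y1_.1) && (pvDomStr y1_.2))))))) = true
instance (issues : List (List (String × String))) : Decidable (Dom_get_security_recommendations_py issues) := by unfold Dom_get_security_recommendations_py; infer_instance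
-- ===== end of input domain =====

-- B replaces A's type-list materialisation plus three membership scans by a single pass over the issues with three boolean flags and early exit (alternative decomposition; same cost).


-- ===== PORT A =====
-- issue['type']: exact where the key is present (Pre_ excludes the KeyError case, where get? = none)
def pvTypeOf (issue : List (String × String)) : String :=
  ((PySem.Dict.mk issue).get? "type").getD ""

def get_security_recommendations_py (issues : List (List (String × String))) : List String :=
  let recommendations : List String := []
  let issue_types := issues.map (fun issue => pvTypeOf issue)
  let recommendations := if issue_types.contains "hardcoded_secrets" then recommendations ++ ["Use AWS Secrets Manager or Systems Manager Parameter Store for sensitive data"] else recommendations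
  let recommendations := if issue_types.contains "overly_permissive" then recommendations ++ ["Apply principle of least privilege to IAM policies and security groups"] else recommendations
  let recommendations := if issue_types.contains "unencrypted_storage" then recommendations ++ ["Enable encryption at rest for all storage services"] else recommendations
  recommendations

-- ===== PORT B =====
-- the for-loop of Source B with its three flags and 'break' when all are set
def pvScan : List (List (String × String)) → Bool → Bool → Bool → Bool × Bool × Bool
  | [], hs, op, ue => (hs, op, ue)
  | issue :: rest, hs, op, ue =>
    let t := pvTypeOf issue
    let hs := hs || (t == "hardcoded_secrets")
    let op := op || (t == "overly_permissive")
    let ue := ue || (t == "unencrypted_storage")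
    if hs && op && ue then (hs, op, ue) else pvScan rest hs op ue

def get_security_recommendations_py_alt (issues : List (List (String × String))) : List String :=
  let r := pvScan issues false false false
  (if r.1 then ["Use AWS Secrets Manager or Systems Manager Parameter Store for sensitive data"] else []) ++
  (if r.2.1 then ["Apply principle of least privilege to IAM policies and security groups"] else []) ++
  (if r.2.2 then ["Enable encryption at rest for all storage services"] else [])

-- ===== PRECONDITION & SPEC =====
-- Pre_ excludes exactly the inputs where A raises KeyError: an issue dict without a 'type' key.
def Pre_get_security_recommendations_py (issues : List (List (String × String))) : Prop :=
  (issues.all (fun issue => issue.any (fun p => p.1 == "type"))) = true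
instance (issues : List (List (String × String))) : Decidable (Pre_get_security_recommendations_py issues) := by unfold Pre_get_security_recommendations_py; infer_instance
def pvWitness_get_security_recommendations_py : (List (List (String × String))) :=
  [[("type", "hardcoded_secrets")], [("type", "unencrypted_storage"), ("id", "r1")]]
def Spec_get_security_recommendations_py (issues : List (List (String × String))) (out : List String) : Prop := out = get_security_recommendations_py_alt issues
instance (issues : List (List (String × String))) (out : List String) : Decidable (Spec_get_security_recommendations_py issues out) := by unfold Spec_get_security_recommendations_py; infer_instance

-- ===== CLAIM =====
def Claim_equal_get_security_recommendations_py : Prop := ∀ (issues : List (List (String × String))), Dom_get_security_recommendations_py issues → Pre_get_security_recommendations_py issues → Spec_get_security_recommendations_py issues (get_security_recommendations_py issues)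

-- ===== LEMMAS AND PROOFS =====
-- the loop computes, OR-ed onto the incoming flags, exactly the three membership facts A tests
theorem pvScan_eq (ts : List (List (String × String))) (hs op ue : Bool) :
    pvScan ts hs op ue =
      (hs || (ts.map pvTypeOf).contains "hardcoded_secrets",
       op || (ts.map pvTypeOf).contains "overly_permissive",
       ue || (ts.map pvTypeOf).contains "unencrypted_storage") := by
  induction ts generalizing hs op ue with
  | nil => simp [pvScan]
  | cons issue rest ih =>
    simp only [pvScan, List.map_cons, List.contains_cons]
    split
    · next h =>
      obtain ⟨⟨h1, h2⟩, h3⟩ := by simpa using h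
      rcases h1 with h1 | h1 <;> rcases h2 with h2 | h2 <;> rcases h3 with h3 | h3 <;>
        simp_all
    · rw [ih]
      simp [Bool.or_assoc, BEq.comm]

-- ===== VERDICT =====
theorem get_security_recommendations_py_spec : Claim_equal_get_security_recommendations_py := by
  intro issues _ _
  unfold Spec_get_security_recommendations_py get_security_recommendations_py get_security_recommendations_py_alt
  rw [pvScan_eq]
  cases h1 : (issues.map pvTypeOf).contains "hardcoded_secrets" <;>
    cases h2 : (issues.map pvTypeOf).contains "overly_permissive" <;>
      cases h3 : (issues.map pvTypeOf).contains "unencrypted_storage" <;>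
        simp only [h1, h2, h3] <;> rfl
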